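-- pv_equiv track=rewrite | github.com/WankaIbrahim/flarex | flarex/net/diagnose.py | _hop_count
-- ===== SOURCE A (Python) =====
-- from typing import Any, Dict, Iterator, List, Optional
--
-- def _hop_count(classified: List[tuple]) -> Dict[str, List[int]]:
--     """
--     Apply the hop-counting algorithm to a list of classified TTL observations.
--
--     Each entry in ``classified`` pairs a hop IP address with a boolean
--     indicating whether the test probe at that TTL was forwarded (``True``) or
--     dropped (``False``). The resulting counts mirror the algorithm from
--     de Boer & Bosma. - for every TTL observation the responding router's
--     unfiltered or filtered counter is incremented by one.
--
--     Args:
--         classified: List of ``(hop_ip, is_unfiltered)`` tuples, one per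
--             probed TTL.
--
--     Returns:
--         Dictionary mapping each hop IP to a two-element list
--         ``[unfiltered_count, filtered_count]``.
--     """
--     counts: Dict[str, List[int]] = {}
--     for hop_ip, is_unfiltered in classified:
--         if hop_ip not in counts:
--             counts[hop_ip] = [0, 0]
--         if is_unfiltered:
--             counts[hop_ip][0] += 1
--         else:
--             counts[hop_ip][1] += 1
--     return counts
-- ===== SOURCE B (Python) =====
-- from typing import Dict, List
-- from collections import Counter
--
--
-- def _hop_count(classified: List[tuple]) -> Dict[str, List[int]]:
--     """Count-table decomposition: tally (hop_ip, is_unfiltered) pairs once,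
--     then assemble [unfiltered, filtered] per distinct hop IP."""
--     table = Counter(classified)
--     return {
--         ip: [table[(ip, True)], table[(ip, False)]]
--         for ip in dict.fromkeys(ip for ip, _ in classified)
--     }
-- ===== Notes on version B (the rewrite author's own statement) =====
-- stated objective: alternative
-- what changed: Replaces the per-observation branch-and-increment on a mutable dict of [unfiltered, filtered] lists with a two-phase table-then-assemble decomposition: one Counter over the (ip, flag) pairs, then a comprehension over the first-occurrence-deduped IPs building each [count(ip,True), count(ip,False)] pair.
import Mathlib
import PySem

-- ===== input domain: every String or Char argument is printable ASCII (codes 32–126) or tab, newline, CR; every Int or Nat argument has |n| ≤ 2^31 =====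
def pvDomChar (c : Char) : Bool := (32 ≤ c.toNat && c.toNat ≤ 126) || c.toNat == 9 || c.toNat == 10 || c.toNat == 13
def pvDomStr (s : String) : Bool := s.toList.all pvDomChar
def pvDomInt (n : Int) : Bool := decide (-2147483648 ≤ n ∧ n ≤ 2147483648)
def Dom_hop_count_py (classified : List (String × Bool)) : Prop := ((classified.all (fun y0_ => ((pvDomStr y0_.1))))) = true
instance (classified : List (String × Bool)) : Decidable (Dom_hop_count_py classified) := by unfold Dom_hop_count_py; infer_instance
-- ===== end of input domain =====

-- B rebuilds A's per-observation branch-and-increment loop as a two-phase table-then-assemble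
-- decomposition (Counter of the pairs, then one assembly pass over the distinct IPs); objective: alternative.

-- ===== PORT A =====
-- counts[hop_ip][0] += 1  (the two-slot list with its first slot incremented)
def pvIncAt0 (l : List Int) : List Int :=
  match l with
  | a :: rest => (a + 1) :: rest
  | [] => []

-- counts[hop_ip][1] += 1  (the two-slot list with its second slot incremented)
def pvIncAt1 (l : List Int) : List Int :=
  match l with
  | a :: b :: rest => a :: (b + 1) :: rest
  | l => l

-- one iteration of A's loop body
def pvAStep (counts : PySem.Dict String (List Int)) (p : String × Bool) :
    PySem.Dict String (List Int) :=
  let c1 := if counts.contains p.1 then counts else counts.insert p.1 [(0 : Int), 0]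
  if p.2 then c1.modify p.1 [(0 : Int), 0] pvIncAt0 else c1.modify p.1 [(0 : Int), 0] pvIncAt1

def hop_count_py (classified : List (String × Bool)) : List (String × List Int) :=
  (classified.foldl pvAStep PySem.Dict.empty).items

-- ===== PORT B =====
def hop_count_py_alt (classified : List (String × Bool)) : List (String × List Int) :=
  let table := PySem.Dict.counter classified
  (PySem.List.dedup (classified.map (fun p => p.1))).map
    (fun ip => (ip, [table.getD (ip, true) 0, table.getD (ip, false) 0]))

-- ===== PRECONDITION & SPEC =====
def Spec_hop_count_py (classified : List (String × Bool)) (out : List (String × List Int)) : Prop := out = hop_count_py_alt classified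
instance (classified : List (String × Bool)) (out : List (String × List Int)) : Decidable (Spec_hop_count_py classified out) := by unfold Spec_hop_count_py; infer_instance

-- ===== CLAIM (what is proved, stated in full; the proofs are below) =====
def Claim_equal_hop_count_py : Prop := ∀ (classified : List (String × Bool)), Dom_hop_count_py classified → Spec_hop_count_py classified (hop_count_py classified)

-- ===== LEMMAS AND PROOFS =====

-- the common value both programs compute for one hop IP
def pvSpecFn (xs : List (String × Bool)) (ip : String) : String × List Int :=
  (ip, [(List.count (ip, true) xs : Int), (List.count (ip, false) xs : Int)])

lemma pvDedup_append {α : Type} [BEq α] [LawfulBEq α] (l : List α) (a : α) :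
    PySem.List.dedup (l ++ [a]) =
      if a ∈ l then PySem.List.dedup l else PySem.List.dedup l ++ [a] := by
  simp only [PySem.List.dedup_eq_ofList, PySem.Set.ofList_append_singleton,
    PySem.Set.add_eq_ite, PySem.Set.mem_ofList]

lemma pvA_items (xs : List (String × Bool)) :
    (xs.foldl pvAStep PySem.Dict.empty).items
      = (PySem.List.dedup (xs.map (fun p => p.1))).map (pvSpecFn xs) := by
  induction xs using List.reverseRecOn with
  | nil => rfl
  | append_singleton xs p ih =>
    obtain ⟨q, b⟩ := p
    rw [List.foldl_append, List.foldl_cons, List.foldl_nil]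
    set d := xs.foldl pvAStep PySem.Dict.empty with hd
    have hkeys : d.keys = PySem.List.dedup (xs.map (fun p => p.1)) := by
      have h0 : d.keys = d.items.map Prod.fst := rfl
      have hfst : (Prod.fst ∘ pvSpecFn xs) = id := by funext ip; rfl
      rw [h0, ih, List.map_map, hfst, List.map_id]
    have hnd : d.keys.Nodup := by rw [hkeys]; exact PySem.List.nodup_dedup _
    have hcont : d.contains q = true ↔ q ∈ xs.map (fun p => p.1) := by
      rw [PySem.Dict.contains_iff_mem_keys, hkeys, PySem.List.mem_dedup]
    rw [List.map_append]
    simp only [List.map_cons, List.map_nil]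
    rw [pvDedup_append]
    by_cases hm : q ∈ List.map (fun p => p.1) xs
    · -- existing key: the outer `if` keeps the dict, the modify overwrites q's slot
      have hc : d.contains q = true := hcont.mpr hm
      have hmem : (q, [(List.count (q, true) xs : Int), (List.count (q, false) xs : Int)])
          ∈ d.items := by
        rw [ih]
        exact List.mem_map.mpr ⟨q, (PySem.List.mem_dedup _ _).mpr hm, rfl⟩
      have hget : d.getD q [0, 0]
          = [(List.count (q, true) xs : Int), (List.count (q, false) xs : Int)] :=
        PySem.Dict.getD_of_mem_items d hmem hnd _
      have hmap : ∀ (w : List Int),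
          (d.insert q w).items
            = (PySem.List.dedup (xs.map (fun p => p.1))).map
                (fun ip => if (ip == q) = true then (q, w) else pvSpecFn xs ip) := by
        intro w
        rw [PySem.Dict.items_insert_of_contains d w hc, ih, List.map_map]
        refine List.map_congr_left ?_
        intro ip _
        by_cases hip : ip = q <;> simp [pvSpecFn, hip]
      rw [if_pos hm]
      cases b with
      | true =>
        have hstep : pvAStep d (q, true)
            = d.insert q [(List.count (q, true) xs : Int) + 1, (List.count (q, false) xs : Int)] := by
          simp [pvAStep, hc, PySem.Dict.modify, hget, pvIncAt0]
        rw [hstep, hmap]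
        refine List.map_congr_left ?_
        intro ip hip
        by_cases hipq : ip = q
        · subst hipq
          simp [pvSpecFn, List.count_append, List.count_nil, Prod.ext_iff]
        · have hqip : q ≠ ip := fun h => hipq h.symm
          simp [pvSpecFn, hipq, hqip, List.count_append, List.count_nil,
            Prod.ext_iff]
      | false =>
        have hstep : pvAStep d (q, false)
            = d.insert q [(List.count (q, true) xs : Int), (List.count (q, false) xs : Int) + 1] := by
          simp [pvAStep, hc, PySem.Dict.modify, hget, pvIncAt1]
        rw [hstep, hmap]
        refine List.map_congr_left ?_
        intro ip hip
        by_cases hipq : ip = q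
        · subst hipq
          simp [pvSpecFn, List.count_append, List.count_nil, Prod.ext_iff]
        · have hqip : q ≠ ip := fun h => hipq h.symm
          simp [pvSpecFn, hipq, hqip, List.count_append, List.count_nil,
            Prod.ext_iff]
    · -- fresh key: the outer `if` appends (q, [0, 0]) and the modify overwrites that slot
      have hc : d.contains q = false := by
        cases h' : d.contains q
        · rfl
        · exact absurd (hcont.mp h') hm
      have hcnt : ∀ c : Bool, List.count (q, c) xs = 0 := by
        intro c
        refine List.count_eq_zero.mpr ?_
        intro hin
        exact hm (List.mem_map.mpr ⟨(q, c), hin, rfl⟩)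
      have hcommon : ∀ (w : List Int),
          (d.insert q w).items
            = (PySem.List.dedup (xs.map (fun p => p.1))).map (pvSpecFn (xs ++ [(q, b)]))
              ++ [(q, w)] := by
        intro w
        rw [PySem.Dict.items_insert_of_not_contains d _ hc, ih]
        congr 1
        refine List.map_congr_left ?_
        intro ip hip
        have hip' : ip ∈ List.map (fun p => p.1) xs := (PySem.List.mem_dedup _ _).mp hip
        have hipq : ip ≠ q := by rintro rfl; exact hm hip'
        have hqip : q ≠ ip := fun h => hipq h.symm
        simp [pvSpecFn, List.count_append, List.count_nil, hqip,
          Prod.ext_iff]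
      rw [if_neg hm, List.map_append]
      cases b with
      | true =>
        have hstep : pvAStep d (q, true) = d.insert q [(1 : Int), 0] := by
          simp [pvAStep, hc, PySem.Dict.modify, PySem.Dict.getD_insert_self,
            PySem.Dict.insert_insert_self, pvIncAt0]
        rw [hstep, hcommon]
        congr 1
        simp [pvSpecFn, List.count_append, List.count_nil, hcnt,
          Prod.ext_iff]
      | false =>
        have hstep : pvAStep d (q, false) = d.insert q [(0 : Int), 1] := by
          simp [pvAStep, hc, PySem.Dict.modify, PySem.Dict.getD_insert_self,
            PySem.Dict.insert_insert_self, pvIncAt1]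
        rw [hstep, hcommon]
        congr 1
        simp [pvSpecFn, List.count_append, List.count_nil, hcnt,
          Prod.ext_iff]

-- ===== VERDICT (by name: the statement is the Claim_ definition above) =====
theorem hop_count_py_spec : Claim_equal_hop_count_py := by
  intro classified _
  unfold Spec_hop_count_py
  rw [hop_count_py, pvA_items]
  simp only [hop_count_py_alt, PySem.Dict.getD_counter]
  rfl
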